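-- pv_equiv track=rewrite | github.com/oscars47/diffegeom | quadratic_fit_code.py | check_for_repeating_indices
-- ===== SOURCE A (Python) =====
-- def check_for_repeating_indices(grown_regions):
--     all_indices = set()
--     for region in grown_regions:
--         for index in region:
--             if index in all_indices:
--                 return True  # Found a repeating index
--             all_indices.add(index)
--     return False
-- ===== SOURCE B (Python) =====
-- def check_for_repeating_indices(grown_regions):
--     flat = sorted(index for region in grown_regions for index in region)
--     return any(a == b for a, b in zip(flat, flat[1:]))
-- ===== Notes on version B (the rewrite author's own statement) =====
-- stated objective: alternative
-- what changed: Replaces the hash-set membership loop with early return by a sort-then-adjacent-scan: flatten the indices, sort them, and report whether any two neighbouring sorted values are equal.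
import Mathlib
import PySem

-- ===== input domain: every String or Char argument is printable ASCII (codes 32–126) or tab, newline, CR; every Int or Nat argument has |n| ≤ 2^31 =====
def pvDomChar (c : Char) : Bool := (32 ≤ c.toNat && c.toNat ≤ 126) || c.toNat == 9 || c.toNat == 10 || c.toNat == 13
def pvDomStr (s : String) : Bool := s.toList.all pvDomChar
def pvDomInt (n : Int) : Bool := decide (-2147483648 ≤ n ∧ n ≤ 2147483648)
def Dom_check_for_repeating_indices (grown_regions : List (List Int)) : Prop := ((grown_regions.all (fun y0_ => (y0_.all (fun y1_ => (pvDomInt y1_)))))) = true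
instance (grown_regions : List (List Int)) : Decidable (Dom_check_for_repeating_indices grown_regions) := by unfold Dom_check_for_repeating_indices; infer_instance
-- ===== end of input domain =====

-- B sorts the flattened indices and scans for an equal adjacent pair, instead of A's
-- early-returning hash-set membership loop (objective: alternative algorithm).
-- ===== PORT A =====
-- inner 'for index in region' loop: none = early 'return True', some s = updated set
def pvAInner (region : List Int) (all_indices : PySem.Set Int) : Option (PySem.Set Int) :=
  match region with
  | [] => some all_indices
  | index :: rest =>
    if PySem.Set.contains all_indices index then none
    else pvAInner rest (PySem.Set.add all_indices index)

-- outer 'for region in grown_regions' loop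
def pvALoop (grown_regions : List (List Int)) (all_indices : PySem.Set Int) : Bool :=
  match grown_regions with
  | [] => false
  | region :: rest =>
    match pvAInner region all_indices with
    | none => true
    | some s => pvALoop rest s

def check_for_repeating_indices (grown_regions : List (List Int)) : Bool :=
  pvALoop grown_regions PySem.Set.empty

-- ===== PORT B =====
def check_for_repeating_indices_alt (grown_regions : List (List Int)) : Bool :=
  let flat := PySem.List.sorted (grown_regions.flatMap (fun region => region)) (fun x => x) false
  (flat.zip flat.tail).any (fun p => p.1 == p.2)   -- any(a == b for a, b in zip(flat, flat[1:]))

-- ===== PRECONDITION & SPEC =====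
def Spec_check_for_repeating_indices (grown_regions : List (List Int)) (out : Bool) : Prop := out = check_for_repeating_indices_alt grown_regions
instance (grown_regions : List (List Int)) (out : Bool) : Decidable (Spec_check_for_repeating_indices grown_regions out) := by unfold Spec_check_for_repeating_indices; infer_instance

-- ===== CLAIM (what is proved, stated in full; the proofs are below) =====
def Claim_equal_check_for_repeating_indices : Prop := ∀ (grown_regions : List (List Int)), Dom_check_for_repeating_indices grown_regions → Spec_check_for_repeating_indices grown_regions (check_for_repeating_indices grown_regions)

-- ===== LEMMAS AND PROOFS =====

-- the inner loop returns True (none) exactly when s ++ region has a repeat, else the grown set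
theorem pv_aInner_eq (region : List Int) (s : PySem.Set Int) (hs : s.Nodup) :
    pvAInner region s = if (s ++ region).Nodup then some (s ++ region) else none := by
  induction region generalizing s with
  | nil => simp [pvAInner, hs]
  | cons i rest ih =>
    by_cases hi : i ∈ s
    · have hc : PySem.Set.contains s i = true := (PySem.Set.contains_iff _ _).mpr hi
      have : ¬ (s ++ i :: rest).Nodup := by
        intro h
        exact (List.disjoint_of_nodup_append h) hi List.mem_cons_self
      simp [pvAInner, hi, this]
    · have hc : PySem.Set.contains s i = false := by
        by_contra h
        exact hi ((PySem.Set.contains_iff _ _).mp (by simpa using h))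
      have hadd : PySem.Set.add s i = s ++ [i] := by
        simp only [PySem.Set.add]; rw [hc]; simp
      have hnd : (s ++ [i]).Nodup := by
        refine hs.append (List.nodup_singleton i) ?_
        intro a ha hb
        exact hi ((List.mem_singleton.mp hb) ▸ ha)
      rw [pvAInner, hc]
      simp only [Bool.false_eq_true, if_false, hadd, ih (s ++ [i]) hnd,
        List.append_assoc, List.singleton_append]

-- the outer loop returns whether s ++ (all indices) has a repeat
theorem pv_aLoop_eq (grown_regions : List (List Int)) (s : PySem.Set Int) (hs : s.Nodup) :
    pvALoop grown_regions s
      = !decide ((s ++ grown_regions.flatMap (fun r => r)).Nodup) := by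
  induction grown_regions generalizing s with
  | nil => simp [pvALoop, hs]
  | cons region rest ih =>
    rw [pvALoop, pv_aInner_eq region s hs]
    by_cases hnd : (s ++ region).Nodup
    · rw [if_pos hnd]
      simp only [ih (s ++ region) hnd, List.flatMap_cons, List.append_assoc]
    · rw [if_neg hnd]
      have h2 : ¬ ((s ++ region) ++ rest.flatMap (fun r => r)).Nodup := fun h =>
        hnd (h.sublist (List.sublist_append_left _ _))
      rw [List.flatMap_cons, ← List.append_assoc, decide_eq_false h2]
      rfl

-- on a ≤-sorted list, an equal adjacent pair exists exactly when the list has duplicates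
theorem pv_adj_eq_of_sorted (xs : List Int) (hp : xs.Pairwise (· ≤ ·)) :
    ((xs.zip xs.tail).any (fun p => p.1 == p.2)) = !decide xs.Nodup := by
  induction xs with
  | nil => simp
  | cons x rest ih =>
    match rest, hp with
    | [], _ => simp
    | y :: rest', hp =>
      have hp' : (y :: rest').Pairwise (· ≤ ·) := hp.tail
      by_cases hxy : x = y
      · have hmem : x ∈ y :: rest' := by simp [hxy]
        simp [hxy, List.nodup_cons]
      · have hxley : x ≤ y := (List.pairwise_cons.mp hp).1 y List.mem_cons_self
        have hxlt : x < y := lt_of_le_of_ne hxley hxy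
        have hnotmem : x ∉ y :: rest' := by
          intro hm
          rcases List.mem_cons.mp hm with h | h
          · exact hxy h
          · have : y ≤ x := (List.pairwise_cons.mp hp').1 x h
            exact absurd (lt_of_lt_of_le hxlt this) (lt_irrefl x)
        have := ih hp'
        simp only [List.tail_cons, List.zip_cons_cons, List.any_cons, beq_iff_eq] at this ⊢
        rw [this]
        simp [List.nodup_cons, hnotmem, hxy]

-- ===== VERDICT (by name: the statement is the Claim_ definition above) =====
theorem check_for_repeating_indices_spec : Claim_equal_check_for_repeating_indices := by
  intro grown_regions _
  unfold Spec_check_for_repeating_indices check_for_repeating_indices check_for_repeating_indices_alt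
  have hs : (PySem.Set.empty : PySem.Set Int).Nodup := List.nodup_nil
  rw [pv_aLoop_eq _ _ hs]
  show (!decide ((([] : List Int) ++ grown_regions.flatMap (fun r => r)).Nodup)) = _
  rw [List.nil_append]
  set flat0 := grown_regions.flatMap (fun region => region) with hflat
  have hperm : (PySem.List.sorted flat0 (fun x => x) false).Perm flat0 :=
    PySem.List.sorted_perm _ _ _
  rw [pv_adj_eq_of_sorted _ (PySem.List.sorted_pairwise flat0 (fun x => x)),
    decide_eq_decide.mpr hperm.nodup_iff]
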